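-- pv_equiv track=rewrite | github.com/saadxelp/Document_Categorisation | doc_categorizer_openai.py | format_output_compact
-- ===== SOURCE A (Python) =====
-- def format_output_compact(page_categories):
--     """
--     Format page categories into compact output format: Category1 (start–end), Category2 (start–end), ...
--
--     Args:
--         page_categories: List of category strings for each page (1-indexed pages)
--
--     Returns:
--         Formatted string like "Claim Form (1–5), Discharge Summary (6–7), Hospital Bill (8–15)"
--     """
--     if not page_categories:
--         return ""
--
--     # Category name mapping for output display
--     category_display_map = {
--         "Hospital Bills": "Hospital Bill",
--         "Pharmacy Bills": "Pharmacy Bill",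
--         "Diagnostic Bills": "Diagnostic Bill"
--     }
--
--     # Group consecutive pages with the same category
--     grouped = []
--     current_category = page_categories[0]
--     start_page = 1
--     end_page = 1
--
--     for i in range(1, len(page_categories)):
--         if page_categories[i] == current_category:
--             end_page = i + 1
--         else:
--             # Add the current group
--             grouped.append((current_category, start_page, end_page))
--
--             # Start new group
--             current_category = page_categories[i]
--             start_page = i + 1
--             end_page = i + 1
--
--     # Add the last group
--     grouped.append((current_category, start_page, end_page))
--
--     # Format the output
--     formatted_parts = []
--     for category, start, end in grouped:
--         # Map category name for display
--         display_category = category_display_map.get(category, category)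
--
--         # Format: Category (start–end) or Category (start) for single page
--         if start == end:
--             formatted_parts.append(f"{display_category} ({start})")
--         else:
--             formatted_parts.append(f"{display_category} ({start}–{end})")
--
--     return ", ".join(formatted_parts)
-- ===== SOURCE B (Python) =====
-- def format_output_compact(page_categories):
--     if not page_categories:
--         return ""
--     display = {
--         "Hospital Bills": "Hospital Bill",
--         "Pharmacy Bills": "Pharmacy Bill",
--         "Diagnostic Bills": "Diagnostic Bill",
--     }
--     # Stage 1: run starts, found by comparing each adjacent pair of pages.
--     starts = [(0, page_categories[0])] + [
--         (i + 1, b)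
--         for i, (a, b) in enumerate(zip(page_categories, page_categories[1:]))
--         if a != b
--     ]
--     # Stage 2: each run ends where the next one starts (the last at len).
--     bounds = [s for s, _ in starts[1:]] + [len(page_categories)]
--     # Stage 3: format.
--     parts = []
--     for (s, cat), e in zip(starts, bounds):
--         name = display.get(cat, cat)
--         parts.append(f"{name} ({s + 1})" if e == s + 1 else f"{name} ({s + 1}\u2013{e})")
--     return ", ".join(parts)
-- ===== Notes on version B (the rewrite author's own statement) =====
-- stated objective: alternative
-- what changed: Replaces A's stateful single pass (mutating current_category/start_page/end_page while walking indices, buffering (cat,start,end) triples, then formatting) with a staged, index-free pipeline: run starts are found by filtering the adjacent-pair list zip(pcs, pcs[1:]) for inequality, each run's end is read off as the next run's start (pairing the starts list with its own tail plus len), and a final pass formats; no run-length state machine is maintained at all.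
import Mathlib
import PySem

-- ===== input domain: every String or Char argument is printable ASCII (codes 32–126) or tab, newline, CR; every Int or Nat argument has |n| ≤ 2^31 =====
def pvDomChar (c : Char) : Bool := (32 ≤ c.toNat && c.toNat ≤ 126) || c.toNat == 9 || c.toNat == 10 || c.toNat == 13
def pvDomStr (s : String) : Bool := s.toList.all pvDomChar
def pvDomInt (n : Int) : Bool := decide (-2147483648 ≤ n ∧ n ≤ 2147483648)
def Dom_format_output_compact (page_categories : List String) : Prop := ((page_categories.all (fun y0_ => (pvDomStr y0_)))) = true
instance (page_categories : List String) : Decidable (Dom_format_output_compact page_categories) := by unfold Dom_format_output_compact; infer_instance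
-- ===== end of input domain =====

-- B replaces A's stateful grouping pass by a staged pipeline (adjacent-pair filter → run starts →
-- bounds by self-zip → format); alternative decomposition, same return value.

-- ===== PORT A =====
-- category_display_map (the same literal dict both Python sources define)
def pvDispMap : PySem.Dict String String :=
  PySem.Dict.ofList
    [("Hospital Bills", "Hospital Bill"),
     ("Pharmacy Bills", "Pharmacy Bill"),
     ("Diagnostic Bills", "Diagnostic Bill")]

-- the body of A's formatting loop over `grouped` = (category, start, end) triples
def pvFmt (g : String × Int × Int) : String :=
  let disp := PySem.Dict.getD pvDispMap g.1 g.1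
  if g.2.1 = g.2.2 then disp ++ " (" ++ PySem.Int.toStr g.2.1 ++ ")"
  else disp ++ " (" ++ PySem.Int.toStr g.2.1 ++ "–" ++ PySem.Int.toStr g.2.2 ++ ")"

-- the body of A's grouping loop; state = (current_category, start_page, end_page, grouped).
-- page_categories[i] is read with pyGetD: i ∈ range(1, len) is always in range, so this is exact
def pvAStep (pcs : List String) (st : String × Int × Int × List (String × Int × Int))
    (i : Int) : String × Int × Int × List (String × Int × Int) :=
  let x := PySem.List.pyGetD pcs i ""
  if x = st.1 then (st.1, st.2.1, i + 1, st.2.2.2)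
  else (x, i + 1, i + 1, st.2.2.2 ++ [(st.1, st.2.1, st.2.2.1)])

def format_output_compact (page_categories : List String) : String :=
  match page_categories with
  | [] => ""
  | c0 :: _ =>
    let st := (PySem.List.pyRange 1 (page_categories.length : Int) 1).foldl
                (pvAStep page_categories) (c0, 1, 1, [])
    let grouped := st.2.2.2 ++ [(st.1, st.2.1, st.2.2.1)]
    String.intercalate ", " (grouped.map pvFmt)

-- ===== PORT B =====
-- B's formatting of one (start, category) paired with its run's end bound
def pvBFmtP (p : (Int × String) × Int) : String :=
  let name := PySem.Dict.getD pvDispMap p.1.2 p.1.2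
  if p.2 = p.1.1 + 1 then name ++ " (" ++ PySem.Int.toStr (p.1.1 + 1) ++ ")"
  else name ++ " (" ++ PySem.Int.toStr (p.1.1 + 1) ++ "–" ++ PySem.Int.toStr p.2 ++ ")"

-- zip(pcs, pcs[1:]) is pcs.zip (pcs.drop 1) (exact: the slice 1: of a list is drop 1)
def format_output_compact_alt (page_categories : List String) : String :=
  match page_categories with
  | [] => ""
  | c0 :: _ =>
    let starts : List (Int × String) :=
      ((0 : Int), c0) ::
        ((PySem.List.enumerate (page_categories.zip (page_categories.drop 1)) 0).filter
            (fun p => p.2.1 != p.2.2)).map (fun p => (p.1 + 1, p.2.2))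
    let bounds : List Int := (starts.drop 1).map (·.1) ++ [(page_categories.length : Int)]
    String.intercalate ", " ((starts.zip bounds).map pvBFmtP)

-- ===== PRECONDITION & SPEC =====
def Spec_format_output_compact (page_categories : List String) (out : String) : Prop := out = format_output_compact_alt page_categories
instance (page_categories : List String) (out : String) : Decidable (Spec_format_output_compact page_categories out) := by unfold Spec_format_output_compact; infer_instance

-- ===== CLAIM (what is proved, stated in full; the proofs are below) =====
def Claim_equal_format_output_compact : Prop := ∀ (page_categories : List String), Dom_format_output_compact page_categories → Spec_format_output_compact page_categories (format_output_compact page_categories)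

-- ===== LEMMAS AND PROOFS =====

-- reference: the grouped (category, start, end) list for l preceded by an open group (cur, s, e)
def pvRef (cur : String) (s e : Int) : List String → List (String × Int × Int)
  | [] => [(cur, s, e)]
  | y :: ys =>
    if y = cur then pvRef cur s (e + 1) ys
    else (cur, s, e) :: pvRef y (e + 1) (e + 1) ys

-- A's fold written as structural recursion carrying the page p of the next element
def pvGoA (l : List String) (p : Int) (st : String × Int × Int × List (String × Int × Int)) :
    String × Int × Int × List (String × Int × Int) :=
  match l with
  | [] => st
  | y :: ys =>
    pvGoA ys (p + 1)
      (if y = st.1 then (st.1, st.2.1, p, st.2.2.2)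
       else (y, p, p, st.2.2.2 ++ [(st.1, st.2.1, st.2.2.1)]))

lemma pvFoldA (pcs : List String) :
    ∀ (m k : Nat), pcs.length - k ≤ m → k ≤ pcs.length → ∀ st,
      (PySem.List.pyRange (k : Int) (pcs.length : Int) 1).foldl (pvAStep pcs) st
        = pvGoA (pcs.drop k) ((k : Int) + 1) st := by
  intro m
  induction m with
  | zero =>
    intro k hm hk st
    have hk' : pcs.length = k := by omega
    rw [PySem.List.pyRange_one_eq_nil (by exact_mod_cast hk'.le)]
    simp [List.drop_eq_nil_of_le hk'.le, pvGoA]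
  | succ n ih =>
    intro k hm hk st
    by_cases h : k < pcs.length
    · rw [PySem.List.pyRange_one_cons (by exact_mod_cast h)]
      rw [List.drop_eq_getElem_cons h]
      simp only [List.foldl_cons]
      have step : pvAStep pcs st (k : Int)
          = (if pcs[k] = st.1 then (st.1, st.2.1, (k : Int) + 1, st.2.2.2)
             else (pcs[k], (k : Int) + 1, (k : Int) + 1, st.2.2.2 ++ [(st.1, st.2.1, st.2.2.1)])) := by
        simp [pvAStep, List.getD_eq_getElem?_getD, List.getElem?_eq_getElem h]
      have h2 := ih (k + 1) (by omega) (by omega) (pvAStep pcs st (k : Int))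
      push_cast at h2 ⊢
      rw [h2, step, pvGoA]
    · have hk' : pcs.length ≤ k := by omega
      rw [PySem.List.pyRange_one_eq_nil (by exact_mod_cast hk')]
      simp [List.drop_eq_nil_of_le hk', pvGoA]

lemma pvFoldA1 (c0 : String) (rest : List String) (st : String × Int × Int × List (String × Int × Int)) :
    (PySem.List.pyRange 1 ((c0 :: rest).length : Int) 1).foldl (pvAStep (c0 :: rest)) st
      = pvGoA rest 2 st := by
  have h := pvFoldA (c0 :: rest) (c0 :: rest).length 1 (by omega) (by simp) st
  norm_num at h ⊢
  rw [h]

lemma pvGoA_ref :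
    ∀ (l : List String) (p : Int) (cur : String) (s : Int) (acc : List (String × Int × Int)),
      (pvGoA l p (cur, s, p - 1, acc)).2.2.2
        ++ [((pvGoA l p (cur, s, p - 1, acc)).1,
             (pvGoA l p (cur, s, p - 1, acc)).2.1,
             (pvGoA l p (cur, s, p - 1, acc)).2.2.1)]
      = acc ++ pvRef cur s (p - 1) l := by
  intro l
  induction l with
  | nil => intro p cur s acc; simp [pvGoA, pvRef]
  | cons y ys ih =>
    intro p cur s acc
    by_cases h : y = cur
    · have h1 := ih (p + 1) cur s acc
      have hp : p + 1 - 1 = p := by ring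
      rw [hp] at h1
      simpa [pvGoA, pvRef, h, hp] using h1
    · have h1 := ih (p + 1) y p (acc ++ [(cur, s, p - 1)])
      have hp : p + 1 - 1 = p := by ring
      rw [hp] at h1
      simp only [pvGoA, pvRef, h, if_false]
      simpa [h, hp] using h1

lemma pvA_eq (c0 : String) (rest : List String) :
    format_output_compact (c0 :: rest)
      = String.intercalate ", " ((pvRef c0 1 1 rest).map pvFmt) := by
  show String.intercalate ", "
      ((((PySem.List.pyRange 1 ((c0 :: rest).length : Int) 1).foldl (pvAStep (c0 :: rest)) (c0, 1, 1, [])).2.2.2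
        ++ [(((PySem.List.pyRange 1 ((c0 :: rest).length : Int) 1).foldl (pvAStep (c0 :: rest)) (c0, 1, 1, [])).1,
             ((PySem.List.pyRange 1 ((c0 :: rest).length : Int) 1).foldl (pvAStep (c0 :: rest)) (c0, 1, 1, [])).2.1,
             ((PySem.List.pyRange 1 ((c0 :: rest).length : Int) 1).foldl (pvAStep (c0 :: rest)) (c0, 1, 1, [])).2.2.1)]).map pvFmt)
      = _
  rw [pvFoldA1]
  have h2 := pvGoA_ref rest 2 c0 1 []
  norm_num at h2
  rw [h2]

-- ===== B-side lemmas =====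

-- the later run starts of a list, with absolute offsets: (ofs+1, d) whenever d breaks a run
def pvT : List String → Int → List (Int × String)
  | [], _ => []
  | [_], _ => []
  | c :: d :: t, ofs => (if d = c then [] else [(ofs + 1, d)]) ++ pvT (d :: t) (ofs + 1)

lemma pvBridge :
    ∀ (l : List String) (ofs : Int),
      ((PySem.List.enumerate (l.zip (l.drop 1)) ofs).filter
          (fun p => p.2.1 != p.2.2)).map (fun p => (p.1 + 1, p.2.2)) = pvT l ofs := by
  intro l
  induction l with
  | nil => intro ofs; simp [pvT, PySem.List.enumerate_nil]
  | cons c rest ih =>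
    intro ofs
    match rest with
    | [] => simp [pvT, PySem.List.enumerate_nil]
    | d :: t =>
      have hz : (c :: d :: t).zip ((c :: d :: t).drop 1) = (c, d) :: ((d :: t).zip t) := by simp
      rw [hz, PySem.List.enumerate_cons]
      have ht : (d :: t).zip ((d :: t).drop 1) = (d :: t).zip t := by simp
      by_cases h : d = c
      · subst h
        simp only [List.filter_cons, bne_self_eq_false, Bool.false_eq_true, if_false]
        rw [show pvT (d :: d :: t) ofs = pvT (d :: t) (ofs + 1) from by simp [pvT]]
        rw [← ih (ofs + 1), ht]
      · have hne : ((c, d).1 != (c, d).2) = true := by simp [bne]; exact fun he => h he.symm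
        simp only [List.filter_cons, hne, if_true, List.map_cons]
        rw [show pvT (c :: d :: t) ofs = (ofs + 1, d) :: pvT (d :: t) (ofs + 1) from by
          simp [pvT, h]]
        rw [← ih (ofs + 1), ht]

lemma pvBFmtP_eq (s E : Int) (cur : String) :
    pvBFmtP ((s, cur), E) = pvFmt (cur, s + 1, E) := by
  by_cases h : E = s + 1
  · simp [pvBFmtP, pvFmt, h]
  · have h' : ¬ (s + 1 = E) := fun he => h he.symm
    simp [pvBFmtP, pvFmt, h, h']

lemma pvMain :
    ∀ (l : List String) (cur : String) (s e : Int),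
      (((s, cur) :: pvT (cur :: l) e).zip
          ((pvT (cur :: l) e).map (·.1) ++ [e + 1 + (l.length : Int)])).map pvBFmtP
        = (pvRef cur (s + 1) (e + 1) l).map pvFmt := by
  intro l
  induction l with
  | nil =>
    intro cur s e
    simp [pvT, pvRef, pvBFmtP_eq]
  | cons y ys ih =>
    intro cur s e
    by_cases h : y = cur
    · subst h
      rw [show pvT (y :: y :: ys) e = pvT (y :: ys) (e + 1) from by simp [pvT]]
      rw [show pvRef y (s + 1) (e + 1) (y :: ys) = pvRef y (s + 1) (e + 1 + 1) ys from by
        simp [pvRef]]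
      rw [show e + 1 + ((y :: ys).length : Int) = e + 1 + 1 + (ys.length : Int) from by
        push_cast [List.length_cons]; ring]
      exact ih y s (e + 1)
    · rw [show pvT (cur :: y :: ys) e = (e + 1, y) :: pvT (y :: ys) (e + 1) from by
        simp [pvT, h]]
      rw [show pvRef cur (s + 1) (e + 1) (y :: ys)
            = (cur, s + 1, e + 1) :: pvRef y (e + 1 + 1) (e + 1 + 1) ys from by
        simp [pvRef, h]]
      rw [show e + 1 + ((y :: ys).length : Int) = e + 1 + 1 + (ys.length : Int) from by
        push_cast [List.length_cons]; ring]
      simp only [List.map_cons, List.cons_append, List.zip_cons_cons]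
      refine congrArg₂ _ (pvBFmtP_eq s (e + 1) cur) ?_
      exact ih y (e + 1) (e + 1)

lemma pvB_eq (c0 : String) (rest : List String) :
    format_output_compact_alt (c0 :: rest)
      = String.intercalate ", " ((pvRef c0 1 1 rest).map pvFmt) := by
  simp only [format_output_compact_alt]
  rw [pvBridge (c0 :: rest) 0]
  rw [List.drop_one, List.tail_cons]
  rw [show ((c0 :: rest).length : Int) = 0 + 1 + (rest.length : Int) from by
    push_cast [List.length_cons]; ring]
  have h := pvMain rest c0 0 0
  norm_num at h ⊢
  rw [h]

-- ===== VERDICT (by name: the statement is the Claim_ definition above) =====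
theorem format_output_compact_spec : Claim_equal_format_output_compact := by
  unfold Claim_equal_format_output_compact
  intro pcs _
  unfold Spec_format_output_compact
  match pcs with
  | [] => rfl
  | c0 :: rest => rw [pvA_eq, pvB_eq]
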